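-- pv_equiv track=rewrite | github.com/luizpgt/Term.ooo-Helper | main.py | filtered_by_not_contained_letters
-- ===== SOURCE A (Python) =====
-- def filtered_by_not_contained_letters(known_not_in, word_set):
--     result_list = []
--     for word in word_set:
--         present_letter_count = 0
--         for letter in known_not_in:
--             if letter in word:
--                 present_letter_count += 1
--         if present_letter_count > 0:
--             continue
--         else:
--             result_list.append(word)
--     result_set = set(result_list)
--     return result_set
-- ===== SOURCE B (Python) =====
-- def filtered_by_not_contained_letters(known_not_in, word_set):
--     # Sieve: start from set(word_set) and shrink it one forbidden letter at a time.
--     result = set(word_set)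
--     for letter in known_not_in:
--         result = {w for w in result if letter not in w}
--     return result
-- ===== Notes on version B (the rewrite author's own statement) =====
-- stated objective: alternative
-- what changed: Replaces the word-outer loop that counts forbidden letters per word by a letter-outer sieve that starts from set(word_set) and successively rebinds it to the subset avoiding each forbidden letter.
import Mathlib
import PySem

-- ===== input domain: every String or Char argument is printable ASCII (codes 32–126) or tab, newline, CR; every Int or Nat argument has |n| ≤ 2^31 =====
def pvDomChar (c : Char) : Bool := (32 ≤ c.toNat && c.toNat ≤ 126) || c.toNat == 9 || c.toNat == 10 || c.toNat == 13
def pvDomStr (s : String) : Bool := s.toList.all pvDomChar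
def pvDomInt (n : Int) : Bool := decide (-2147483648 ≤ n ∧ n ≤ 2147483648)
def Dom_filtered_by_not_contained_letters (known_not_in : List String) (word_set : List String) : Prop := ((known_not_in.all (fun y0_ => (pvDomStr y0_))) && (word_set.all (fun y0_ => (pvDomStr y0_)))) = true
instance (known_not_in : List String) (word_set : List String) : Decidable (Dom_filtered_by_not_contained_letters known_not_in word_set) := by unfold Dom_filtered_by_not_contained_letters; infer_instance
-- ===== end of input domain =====

-- B replaces A's word-outer loop with per-word letter counting by a letter-outer sieve
-- that starts from set(word_set) and successively removes words containing each letter (alternative decomposition).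


-- ===== PORT A =====
-- literal port: count the forbidden letters present in each word, append the word iff the count is 0,
-- then take set(result_list) (PySem.Set.ofList).
def filtered_by_not_contained_letters (known_not_in : List String) (word_set : List String) : List String :=
  let result_list := word_set.foldl (fun result_list word =>
    let present_letter_count : Int := known_not_in.foldl
      (fun present_letter_count letter =>
        if PySem.Str.isIn letter word then present_letter_count + 1 else present_letter_count) 0
    if present_letter_count > 0 then result_list else result_list ++ [word]) []
  PySem.Set.ofList result_list

-- ===== PORT B =====
-- sieve: result = set(word_set); for each letter, keep only the words of result not containing it.
def filtered_by_not_contained_letters_alt (known_not_in : List String) (word_set : List String) : List String :=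
  known_not_in.foldl
    (fun result letter => result.filter (fun w => !(PySem.Str.isIn letter w)))
    (PySem.Set.ofList word_set)

-- ===== PRECONDITION & SPEC =====
def Spec_filtered_by_not_contained_letters (known_not_in : List String) (word_set : List String) (out : List String) : Prop := out = filtered_by_not_contained_letters_alt known_not_in word_set
instance (known_not_in : List String) (word_set : List String) (out : List String) : Decidable (Spec_filtered_by_not_contained_letters known_not_in word_set out) := by unfold Spec_filtered_by_not_contained_letters; infer_instance

-- ===== CLAIM (what is proved, stated in full; the proofs are below) =====
def Claim_equal_filtered_by_not_contained_letters : Prop := ∀ (known_not_in : List String) (word_set : List String), Dom_filtered_by_not_contained_letters known_not_in word_set → Spec_filtered_by_not_contained_letters known_not_in word_set (filtered_by_not_contained_letters known_not_in word_set)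

-- ===== LEMMAS AND PROOFS =====

-- A's inner counting loop counts the forbidden letters occurring in `word`.
theorem pv_count_eq (known_not_in : List String) (word : String) :
    known_not_in.foldl
      (fun c letter => if PySem.Str.isIn letter word then c + 1 else c) (0 : Int)
    = (known_not_in.countP (fun letter => PySem.Str.isIn letter word) : Int) := by
  have h : ∀ (l : List String) (a : Int),
      l.foldl (fun c letter => if PySem.Str.isIn letter word then c + 1 else c) a
      = a + (l.countP (fun letter => PySem.Str.isIn letter word) : Int) := by
    intro l
    induction l with
    | nil => intro a; simp
    | cons x xs ih =>
      intro a
      rw [List.foldl_cons, ih, List.countP_cons]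
      by_cases hx : PySem.Str.isIn x word = true
      · rw [if_pos hx, if_pos hx]; push_cast; ring
      · rw [if_neg hx, if_neg hx]; push_cast; ring
  simpa using h known_not_in 0

-- A's word loop builds exactly the words containing none of the forbidden letters, in order.
theorem pvA_list_eq (known_not_in : List String) (word_set : List String) :
    word_set.foldl (fun result_list word =>
      let present_letter_count : Int := known_not_in.foldl
        (fun present_letter_count letter =>
          if PySem.Str.isIn letter word then present_letter_count + 1 else present_letter_count) 0
      if present_letter_count > 0 then result_list else result_list ++ [word]) []
    = word_set.filter (fun w => known_not_in.all (fun letter => !(PySem.Str.isIn letter w))) := by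
  have hstep : ∀ (acc : List String) (w : String),
      (let c : Int := known_not_in.foldl
        (fun c letter => if PySem.Str.isIn letter w then c + 1 else c) 0
       if c > 0 then acc else acc ++ [w])
      = (if known_not_in.all (fun letter => !(PySem.Str.isIn letter w)) then acc ++ [w] else acc) := by
    intro acc w
    show (if (known_not_in.foldl
        (fun c letter => if PySem.Str.isIn letter w then c + 1 else c) (0 : Int)) > 0
      then acc else acc ++ [w]) = _
    rw [pv_count_eq]
    by_cases hall : known_not_in.all (fun letter => !(PySem.Str.isIn letter w)) = true
    · have h0 : known_not_in.countP (fun letter => PySem.Str.isIn letter w) = 0 := by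
        rw [List.countP_eq_zero]
        intro x hx
        have := List.all_eq_true.mp hall x hx
        simp only [Bool.not_eq_true'] at this
        simpa using this
      rw [h0, if_pos hall, if_neg (by norm_num)]
    · have hne : known_not_in.countP (fun letter => PySem.Str.isIn letter w) ≠ 0 := by
        intro h0
        apply hall
        rw [List.countP_eq_zero] at h0
        rw [List.all_eq_true]
        intro x hx
        have := h0 x hx
        simp only [Bool.not_eq_true']
        exact Bool.eq_false_iff.mpr (fun hc => this hc)
      have hpos : (0 : Int) < (known_not_in.countP (fun letter => PySem.Str.isIn letter w) : Int) := by
        exact_mod_cast Nat.pos_of_ne_zero hne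
      rw [if_pos hpos, if_neg hall]
  calc word_set.foldl (fun acc w =>
        let c : Int := known_not_in.foldl
          (fun c letter => if PySem.Str.isIn letter w then c + 1 else c) 0
        if c > 0 then acc else acc ++ [w]) []
      = word_set.foldl (fun acc w =>
          if known_not_in.all (fun letter => !(PySem.Str.isIn letter w)) then acc ++ [w] else acc) [] := by
        apply PySem.List.foldl_congr_mem
        intro acc w _
        exact hstep acc w
    _ = word_set.filter (fun w => known_not_in.all (fun letter => !(PySem.Str.isIn letter w))) := by
        simpa using PySem.List.foldl_append_if_eq_filter
          (fun w => known_not_in.all (fun letter => !(PySem.Str.isIn letter w))) word_set []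

-- set(·) commutes with filter: dedup-by-first-occurrence of a filtered list = filter of the dedup.
theorem pv_ofList_filter (p : String → Bool) (xs : List String) :
    PySem.Set.ofList (xs.filter p) = (PySem.Set.ofList xs).filter p := by
  have h : ∀ (xs acc : List String),
      ((xs.foldl PySem.Set.add acc).filter p) = (xs.filter p).foldl PySem.Set.add (acc.filter p) := by
    intro xs
    induction xs with
    | nil => intro acc; simp
    | cons x xs ih =>
      intro acc
      rw [List.foldl_cons, ih]
      by_cases hp : p x = true
      · rw [List.filter_cons_of_pos hp, List.foldl_cons]
        have hadd : (PySem.Set.add acc x).filter p = PySem.Set.add (acc.filter p) x := by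
          unfold PySem.Set.add
          by_cases hmem : PySem.Set.contains acc x = true
          · have hx : x ∈ acc := (PySem.Set.contains_iff acc x).mp hmem
            have hcc : PySem.Set.contains (acc.filter p) x = true := by
              rw [PySem.Set.contains_iff]; exact List.mem_filter.mpr ⟨hx, hp⟩
            rw [if_pos hmem, if_pos hcc]
          · have hx : x ∉ acc := fun h' => hmem ((PySem.Set.contains_iff acc x).mpr h')
            have hc : ¬ PySem.Set.contains (acc.filter p) x = true := fun h' =>
              hx (List.mem_filter.mp ((PySem.Set.contains_iff (acc.filter p) x).mp h')).1
            rw [if_neg hmem, if_neg hc,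
              List.filter_append, List.filter_cons_of_pos hp, List.filter_nil]
        rw [hadd]
      · rw [List.filter_cons_of_neg hp]
        have hadd : (PySem.Set.add acc x).filter p = acc.filter p := by
          unfold PySem.Set.add
          by_cases hmem : PySem.Set.contains acc x = true
          · rw [if_pos hmem]
          · rw [if_neg hmem, List.filter_append,
              List.filter_cons_of_neg hp, List.filter_nil, List.append_nil]
        rw [hadd]
  have := h xs []
  simp only [List.filter_nil] at this
  rw [PySem.Set.ofList_eq_foldl, PySem.Set.ofList_eq_foldl, this]

-- B's letter-by-letter sieve equals one filter by the conjunction of all letters.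
theorem pv_sieve_eq (known_not_in : List String) (s : List String) :
    known_not_in.foldl (fun result letter => result.filter (fun w => !(PySem.Str.isIn letter w))) s
    = s.filter (fun w => known_not_in.all (fun letter => !(PySem.Str.isIn letter w))) := by
  induction known_not_in generalizing s with
  | nil => simp
  | cons x xs ih =>
    simp only [List.foldl_cons, ih, List.filter_filter]
    apply List.filter_congr
    intro w _
    simp [Bool.and_comm]

-- ===== VERDICT (by name: the statement is the Claim_ definition above) =====
theorem filtered_by_not_contained_letters_spec : Claim_equal_filtered_by_not_contained_letters := by
  intro known_not_in word_set _
  unfold Spec_filtered_by_not_contained_letters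
  unfold filtered_by_not_contained_letters filtered_by_not_contained_letters_alt
  rw [pvA_list_eq, pv_ofList_filter, pv_sieve_eq]
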